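-- pv_equiv track=rewrite | github.com/guinpen98/2048-AI | py_2048.py | is_invalid_action
-- ===== SOURCE A (Python) =====
-- def is_invalid_action(state,action): # 選択したアクションが無効かどうか
--
--     if action==1:
--         for y in range(4):
--             z_cnt = 0
--             prev = -1
--             for x in range(4):
--                 if state[y][x]==0:
--                     z_cnt += 1
--                 elif state[y][x]==prev or z_cnt > 0:
--                     return False
--                 else:
--                     prev = state[y][x]
--
--     if action==2:
--         for y in range(4):
--             z_cnt = 0
--             prev = -1
--             for x in range(4):
--                 if state[y][3-x]==0:
--                     z_cnt += 1
--                 elif state[y][3-x]==prev or z_cnt > 0: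
--                     return False
--                 else:
--                     prev = state[y][3-x]
--
--     if action==3:
--         for x in range(4):
--             z_cnt = 0
--             prev = -1
--             for y in range(4):
--                 if state[y][x]==0:
--                     z_cnt += 1
--                 elif state[y][x]==prev or z_cnt > 0:
--                     return False
--                 else:
--                     prev = state[y][x]
--
--     if action==4:
--         for x in range(4):
--             z_cnt = 0
--             prev = -1
--             for y in range(4):
--                 if state[3-y][x]==0:
--                     z_cnt += 1
--                 elif state[3-y][x]==prev or z_cnt > 0:
--                     return False
--                 else:
--                     prev = state[3-y][x]
--
--     return True
-- ===== SOURCE B (Python) =====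
-- def _merge(vals):
--     # merge equal adjacent tiles once, left to right
--     if len(vals) >= 2 and vals[0] == vals[1]:
--         return [vals[0] + vals[0]] + _merge(vals[2:])
--     if vals:
--         return [vals[0]] + _merge(vals[1:])
--     return []
--
-- def _slide(line):
--     # result of sliding the line toward its front
--     vals = [v for v in line if v != 0]
--     out = _merge(vals)
--     return out + [0] * (len(line) - len(out))
--
-- def is_invalid_action(state, action):
--     if action == 1:
--         lines = [[state[y][x] for x in range(4)] for y in range(4)]
--     elif action == 2:
--         lines = [[state[y][3 - x] for x in range(4)] for y in range(4)]
--     elif action == 3: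
--         lines = [[state[y][x] for y in range(4)] for x in range(4)]
--     elif action == 4:
--         lines = [[state[3 - y][x] for y in range(4)] for x in range(4)]
--     else:
--         return True
--     return all(_slide(line) == line for line in lines)
-- ===== Notes on version B (the rewrite author's own statement) =====
-- stated objective: simpler
-- what changed: B replaces A's four copy-pasted single-pass 'can anything move' scanners (zero-counter + prev sentinel) by one generic slide/merge simulation: build the lines in movement order, compute each line's post-move form (compact zeros, merge equal adjacent once, pad), and return whether no line changes.
-- intended difference: On boards whose lines (in the movement order) are all stable but where some line's first nonzero tile equals -1, A returns False because its prev=-1 sentinel spuriously matches that tile, while B returns True, which is the intended answer since -1 is not equal to any previously seen tile and nothing can move. — e.g. on is_invalid_action([[-1, 2, 4, 8], [2, 4, 8, 16], [4, 8, 16, 32], [8, 16, 32, 64]], 1): A returns false, B returns true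
-- outside the precondition, e.g. on is_invalid_action([[0, 1]], 1): A returns False, B raises IndexError
import Mathlib
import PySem

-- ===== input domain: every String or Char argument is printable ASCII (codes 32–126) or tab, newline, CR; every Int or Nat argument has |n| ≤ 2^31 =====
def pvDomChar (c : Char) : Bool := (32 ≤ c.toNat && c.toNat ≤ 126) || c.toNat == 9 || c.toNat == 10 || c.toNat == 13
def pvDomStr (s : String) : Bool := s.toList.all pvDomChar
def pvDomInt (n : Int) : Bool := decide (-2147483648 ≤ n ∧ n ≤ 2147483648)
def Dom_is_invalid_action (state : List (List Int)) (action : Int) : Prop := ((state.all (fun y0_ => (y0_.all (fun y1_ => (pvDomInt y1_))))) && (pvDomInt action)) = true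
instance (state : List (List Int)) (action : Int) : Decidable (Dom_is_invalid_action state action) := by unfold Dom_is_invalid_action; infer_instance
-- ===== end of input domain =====

-- B replaces A's four copy-pasted single-pass movability scanners by one generic
-- slide/merge simulation per line plus a change check (objective: simpler).

-- neutral cell accessor (state[y][x]); shared by both ports and by D_
def pvCell (state : List (List Int)) (y x : Int) : Int :=
  PySem.List.pyGetD (PySem.List.pyGetD state y []) x 0

-- the lines of the board in movement order for the given action (used by B's port and by D_)
def pvLinesOf (state : List (List Int)) (action : Int) : List (List Int) :=
  if action = 1 then
    (PySem.List.pyRange 0 4 1).map (fun y => (PySem.List.pyRange 0 4 1).map (fun x => pvCell state y x))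
  else if action = 2 then
    (PySem.List.pyRange 0 4 1).map (fun y => (PySem.List.pyRange 0 4 1).map (fun x => pvCell state y (3 - x)))
  else if action = 3 then
    (PySem.List.pyRange 0 4 1).map (fun x => (PySem.List.pyRange 0 4 1).map (fun y => pvCell state y x))
  else
    (PySem.List.pyRange 0 4 1).map (fun x => (PySem.List.pyRange 0 4 1).map (fun y => pvCell state (3 - y) x))

-- ===== PORT A =====
-- A's inner loop: state machine over one line with zero counter and prev sentinel
def aScan : Int → Int → List Int → Bool
  | _, _, [] => true
  | prev, zcnt, v :: rest =>
    if v = 0 then aScan prev (zcnt + 1) rest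
    else if v = prev ∨ zcnt > 0 then false
    else aScan v zcnt rest

def is_invalid_action (state : List (List Int)) (action : Int) : Bool :=
  (if action = 1 then
      (PySem.List.pyRange 0 4 1).all (fun y =>
        aScan (-1) 0 ((PySem.List.pyRange 0 4 1).map (fun x => pvCell state y x)))
    else true)
  && (if action = 2 then
      (PySem.List.pyRange 0 4 1).all (fun y =>
        aScan (-1) 0 ((PySem.List.pyRange 0 4 1).map (fun x => pvCell state y (3 - x))))
    else true)
  && (if action = 3 then
      (PySem.List.pyRange 0 4 1).all (fun x =>
        aScan (-1) 0 ((PySem.List.pyRange 0 4 1).map (fun y => pvCell state y x)))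
    else true)
  && (if action = 4 then
      (PySem.List.pyRange 0 4 1).all (fun x =>
        aScan (-1) 0 ((PySem.List.pyRange 0 4 1).map (fun y => pvCell state (3 - y) x)))
    else true)

-- ===== PORT B =====
-- merge equal adjacent tiles once, left to right (Source B _merge)
def bMerge : List Int → List Int
  | [] => []
  | [a] => [a]
  | a :: b :: rest => if a = b then (a + a) :: bMerge rest else a :: bMerge (b :: rest)

-- result of sliding the line toward its front (Source B _slide)
def bSlide (line : List Int) : List Int :=
  let vals := line.filter (fun v => !decide (v = 0))
  let out := bMerge vals
  out ++ List.replicate (line.length - out.length) 0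

def is_invalid_action_alt (state : List (List Int)) (action : Int) : Bool :=
  if action = 1 ∨ action = 2 ∨ action = 3 ∨ action = 4 then
    (pvLinesOf state action).all (fun line => bSlide line == line)
  else true

-- ===== PRECONDITION & SPEC =====
-- For movement actions 1–4 the Python indexes state[0..3][0..3]; on smaller boards it raises IndexError.
def Pre_is_invalid_action (state : List (List Int)) (action : Int) : Prop :=
  (action = 1 ∨ action = 2 ∨ action = 3 ∨ action = 4) →
    (4 ≤ state.length ∧ ∀ row ∈ state.take 4, 4 ≤ row.length)
instance (state : List (List Int)) (action : Int) : Decidable (Pre_is_invalid_action state action) := by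
  unfold Pre_is_invalid_action; infer_instance

def pvWitness_is_invalid_action : List (List Int) × Int :=
  ([[2, 0, 0, 0], [0, 4, 0, 0], [0, 0, 8, 0], [0, 0, 0, 16]], 1)

-- a line the move leaves unchanged: no equal adjacent nonzero tiles, no zero gap before a tile
abbrev StableLine (l : List Int) : Prop :=
  ∀ p ∈ l.zip l.tail, (p.1 = 0 → p.2 = 0) ∧ (p.1 ≠ p.2 ∨ p.1 = 0)

-- D_'s own view of the board: the active 4x4 grid and its lines in movement order,
-- written with plain take/reverse/zipWith columns (it agrees with the ports' indexing on Pre_)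
def pvDCols (g : List (List Int)) : List (List Int) :=
  g.foldr (fun r acc => r.zipWith (· :: ·) acc) [[], [], [], []]

def pvDLines (state : List (List Int)) (action : Int) : List (List Int) :=
  let g := (state.take 4).map (·.take 4)
  match action with
  | 1 => g
  | 2 => g.map List.reverse
  | 3 => pvDCols g
  | _ => pvDCols g.reverse

-- On boards whose lines (in the movement order) are all stable but where some line's first
-- nonzero tile is -1, A returns False because its prev=-1 sentinel spuriously matches that
-- tile, while B returns True, the intended answer: nothing on such a board can move.
def D_is_invalid_action (state : List (List Int)) (action : Int) : Prop :=
  (1 ≤ action ∧ action ≤ 4) ∧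
  (∀ l ∈ pvDLines state action, StableLine l) ∧
  (∃ l ∈ pvDLines state action, (l.filter (· ≠ 0)).head? = some (-1))
instance (state : List (List Int)) (action : Int) : Decidable (D_is_invalid_action state action) := by
  unfold D_is_invalid_action; infer_instance

def Spec_is_invalid_action (state : List (List Int)) (action : Int) (out : Bool) : Prop :=
  ¬ D_is_invalid_action state action → out = is_invalid_action_alt state action
instance (state : List (List Int)) (action : Int) (out : Bool) : Decidable (Spec_is_invalid_action state action out) := by
  unfold Spec_is_invalid_action; infer_instance

def pvDiffWitness_is_invalid_action : List (List Int) × Int :=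
  ([[-1, 2, 4, 8], [2, 4, 8, 16], [4, 8, 16, 32], [8, 16, 32, 64]], 1)
def pvDiffWitnessOut_is_invalid_action : Bool × Bool := (false, true)

-- ===== CLAIM (what is proved, stated in full; the proofs are below) =====
def Claim_unchanged_is_invalid_action : Prop := ∀ (state : List (List Int)) (action : Int), Dom_is_invalid_action state action → Pre_is_invalid_action state action → Spec_is_invalid_action state action (is_invalid_action state action)
def Claim_changed_is_invalid_action : Prop := Dom_is_invalid_action (pvDiffWitness_is_invalid_action.1) (pvDiffWitness_is_invalid_action.2) ∧ Pre_is_invalid_action (pvDiffWitness_is_invalid_action.1) (pvDiffWitness_is_invalid_action.2) ∧ D_is_invalid_action (pvDiffWitness_is_invalid_action.1) (pvDiffWitness_is_invalid_action.2) ∧ is_invalid_action (pvDiffWitness_is_invalid_action.1) (pvDiffWitness_is_invalid_action.2) = pvDiffWitnessOut_is_invalid_action.1 ∧ is_invalid_action_alt (pvDiffWitness_is_invalid_action.1) (pvDiffWitness_is_invalid_action.2) = pvDiffWitnessOut_is_invalid_action.2 ∧ pvDiffWitnessOut_is_invalid_action.1 ≠ pvDiffWitnessOut_is_invalid_action.2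
def Claim_exact_is_invalid_action : Prop := ∀ (state : List (List Int)) (action : Int), Dom_is_invalid_action state action → Pre_is_invalid_action state action → D_is_invalid_action state action → is_invalid_action state action ≠ is_invalid_action_alt state action

-- ===== LEMMAS AND PROOFS =====

lemma bMerge_cons_exists (w : Int) (ws : List Int) :
    ∃ h t', bMerge (w :: ws) = h :: t' ∧ (h = w ∨ h = w + w) := by
  cases ws with
  | nil => exact ⟨w, [], rfl, Or.inl rfl⟩
  | cons b t =>
    by_cases hwb : w = b
    · exact ⟨w + w, bMerge t, by simp [bMerge, hwb], Or.inr rfl⟩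
    · exact ⟨w, bMerge (b :: t), by simp [bMerge, hwb], Or.inl rfl⟩

lemma slide_all_zero (t : List Int) (h : ∀ v ∈ t, v = 0) : bSlide t = t := by
  have hf : t.filter (fun v => !decide (v = 0)) = [] :=
    List.filter_eq_nil_iff.mpr (by intro a ha; simp [h a ha])
  have ht : t = List.replicate t.length 0 := List.eq_replicate_of_mem h
  simp [bSlide, hf, bMerge]
  exact ht.symm

lemma slide_zero_cons (t : List Int) : bSlide (0 :: t) = 0 :: t ↔ ∀ v ∈ t, v = 0 := by
  have hfc : ((0 : Int) :: t).filter (fun v => !decide (v = 0)) = t.filter (fun v => !decide (v = 0)) := by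
    simp
  constructor
  · intro hs v hv
    by_contra hv0
    have hvf : v ∈ t.filter (fun v => !decide (v = 0)) := by
      simp [List.mem_filter, hv, hv0]
    cases hft : t.filter (fun v => !decide (v = 0)) with
    | nil => rw [hft] at hvf; exact absurd hvf List.not_mem_nil
    | cons w ws =>
      have hw0 : w ≠ 0 := by
        have hwm : w ∈ t.filter (fun v => !decide (v = 0)) := by
          rw [hft]; exact List.mem_cons_self
        simpa using (List.mem_filter.mp hwm).2
      obtain ⟨h0, t', hm, hh⟩ := bMerge_cons_exists w ws
      have hcalc : bSlide (0 :: t) = h0 :: (t' ++ List.replicate ((0 :: t).length - (h0 :: t').length) 0) := by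
        simp [bSlide, hfc, hft, hm]
      rw [hcalc] at hs
      have h00 : h0 = 0 := by injection hs
      rcases hh with h | h <;> omega
  · intro hall
    refine slide_all_zero (0 :: t) ?_
    intro v hv
    rcases List.mem_cons.mp hv with h | h
    · exact h
    · exact hall v h

lemma slide_cons_ne (v : Int) (t : List Int) (hv : v ≠ 0) :
    bSlide (v :: t) = v :: t ↔
      (t.find? (fun u => !decide (u = 0)) ≠ some v ∧ bSlide t = t) := by
  have hfc : (v :: t).filter (fun u => !decide (u = 0)) = v :: t.filter (fun u => !decide (u = 0)) := by
    simp [hv]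
  cases hft : t.filter (fun u => !decide (u = 0)) with
  | nil =>
    have hall : ∀ u ∈ t, u = 0 := by
      intro u hu
      by_contra hu0
      have hmem : u ∈ t.filter (fun u => !decide (u = 0)) := by
        simp [List.mem_filter, hu, hu0]
      rw [hft] at hmem; exact absurd hmem List.not_mem_nil
    have hfd : t.find? (fun u => !decide (u = 0)) = none := by
      rw [← List.head?_filter, hft]; rfl
    constructor
    · intro _; exact ⟨by simp [hfd], slide_all_zero t hall⟩
    · intro _
      have ht : t = List.replicate t.length 0 := List.eq_replicate_of_mem hall
      simp [bSlide, hfc, hft, bMerge]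
      exact ht.symm
  | cons w ws =>
    by_cases hvw : v = w
    · subst hvw
      constructor
      · intro hs
        exfalso
        have hcalc : bSlide (v :: t) =
            (v + v) :: (bMerge ws ++ List.replicate ((v :: t).length - ((v + v) :: bMerge ws).length) 0) := by
          simp [bSlide, hfc, hft, bMerge]
        rw [hcalc] at hs
        have hvv : v + v = v := by injection hs
        omega
      · rintro ⟨hh, _⟩
        exact absurd (by rw [← List.head?_filter, hft]; rfl) hh
    · have key : bSlide (v :: t) = v :: bSlide t := by
        simp only [bSlide, hfc, hft, bMerge, if_neg hvw, List.cons_append,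
          List.length_cons, Nat.succ_sub_succ]
      have hfd : t.find? (fun u => !decide (u = 0)) = some w := by
        rw [← List.head?_filter, hft]; rfl
      rw [key]
      simp [hfd, Ne.symm hvw]

lemma pred_eq : (fun v : Int => decide (v ≠ 0)) = (fun v : Int => !decide (v = 0)) := by
  funext v
  rw [show (decide (v ≠ 0)) = (decide ¬(v = 0)) from decide_eq_decide.mpr Iff.rfl, decide_not]

lemma headf_eq (l : List Int) :
    (l.filter (· ≠ 0)).head? = l.find? (fun v => !decide (v = 0)) := by
  rw [pred_eq, List.head?_filter]

lemma pairs_zero (t : List Int) :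
    (∀ p ∈ ((0 : Int) :: t).zip t, (p.1 = 0 → p.2 = 0) ∧ (p.1 ≠ p.2 ∨ p.1 = 0)) ↔
      ∀ v ∈ t, v = 0 := by
  induction t with
  | nil => simp
  | cons w t' ih =>
    constructor
    · intro h
      have hw : w = 0 := (h (0, w) (by simp)).1 rfl
      subst hw
      intro v hv
      rcases List.mem_cons.mp hv with rfl | hv'
      · rfl
      · exact ih.mp (fun p hp => h p (by simp [hp])) v hv'
    · intro h p hp
      have hz : ∀ x ∈ (0 : Int) :: w :: t', x = 0 := by
        intro x hx
        rcases List.mem_cons.mp hx with rfl | hx'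
        · rfl
        · exact h x hx'
      obtain ⟨h1, h2⟩ := List.of_mem_zip hp
      exact ⟨fun _ => hz _ (List.mem_cons_of_mem _ h2), Or.inr (hz _ h1)⟩

lemma stable_iff (l : List Int) : bSlide l = l ↔ StableLine l := by
  induction l with
  | nil => simp [bSlide, bMerge, StableLine]
  | cons v t ih =>
    by_cases hv : v = 0
    · subst hv
      rw [slide_zero_cons]
      have hiff : StableLine ((0 : Int) :: t) ↔ ∀ v ∈ t, v = 0 := by
        unfold StableLine
        rw [List.tail_cons]
        exact pairs_zero t
      exact hiff.symm
    · rw [slide_cons_ne v t hv, ih]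
      cases t with
      | nil => simp [StableLine]
      | cons w t' =>
        by_cases hw : w = 0
        · subst hw
          constructor
          · rintro ⟨_, hstab⟩ p hp
            rcases (by simpa using hp : p = (v, (0 : Int)) ∨ p ∈ ((0 : Int) :: t').zip t') with rfl | hp'
            · exact ⟨fun h0 => rfl, Or.inl hv⟩
            · exact hstab p (by simpa using hp')
          · intro h
            refine ⟨?_, fun p hp => h p (by simp; right; simpa using hp)⟩
            have hz : ∀ u ∈ t', u = 0 :=
              (pairs_zero t').mp (fun p hp => h p (by simp; right; exact hp))
            have hf : ((0 : Int) :: t').find? (fun u => !decide (u = 0)) = none := by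
              rw [List.find?_eq_none]
              intro x hx
              rcases List.mem_cons.mp hx with rfl | hx'
              · simp
              · simp [hz x hx']
            rw [hf]
            simp
        · have hf : ((w : Int) :: t').find? (fun u => !decide (u = 0)) = some w := by
            simp [hw]
          constructor
          · rintro ⟨hne, hstab⟩ p hp
            rcases (by simpa using hp : p = (v, w) ∨ p ∈ (w :: t').zip t') with rfl | hp'
            · refine ⟨fun h0 => absurd h0 hv, Or.inl ?_⟩
              intro hvw
              rw [hf] at hne
              exact hne (by simpa using hvw.symm)
            · exact hstab p (by simpa using hp')
          · intro h
            refine ⟨?_, fun p hp => h p (by simp; right; simpa using hp)⟩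
            have hc := h (v, w) (by simp)
            rcases hc.2 with hne | h0
            · rw [hf]
              intro hc2
              exact hne (by simpa using hc2.symm)
            · exact absurd h0 hv

lemma scan_pos (t : List Int) : ∀ (prev z : Int), 0 < z →
    (aScan prev z t = true ↔ ∀ v ∈ t, v = 0) := by
  induction t with
  | nil => intro prev z _; simp [aScan]
  | cons v t ih =>
    intro prev z hz
    by_cases hv : v = 0
    · subst hv
      have hstep : aScan prev z (0 :: t) = aScan prev (z + 1) t := by
        simp [aScan]
      rw [hstep, ih prev (z + 1) (by omega)]
      constructor
      · intro h u hu
        rcases List.mem_cons.mp hu with h' | h'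
        · exact h'
        · exact h u h'
      · intro h u hu; exact h u (List.mem_cons_of_mem _ hu)
    · have hstep : aScan prev z (v :: t) = false := by
        simp [aScan, hv, hz]
      rw [hstep]
      simp only [Bool.false_eq_true, false_iff]
      intro h
      exact hv (h v List.mem_cons_self)

lemma scan_eq (t : List Int) : ∀ prev : Int, prev ≠ 0 →
    aScan prev 0 t =
      (!(t.find? (fun u => !decide (u = 0)) == some prev) && (bSlide t == t)) := by
  induction t with
  | nil => intro prev _; simp [aScan, bSlide, bMerge]
  | cons v t ih =>
    intro prev hp
    by_cases hv : v = 0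
    · subst hv
      have hstep : aScan prev 0 ((0 : Int) :: t) = aScan prev 1 t := by
        simp [aScan]
      have hfc2 : ((0 : Int) :: t).find? (fun u => !decide (u = 0)) = t.find? (fun u => !decide (u = 0)) := by
        simp
      by_cases hall : ∀ u ∈ t, u = 0
      · have h1 : aScan prev 1 t = true := (scan_pos t prev 1 (by omega)).mpr hall
        have h2 : t.find? (fun u => !decide (u = 0)) = none := by
          rw [← List.head?_filter, List.filter_eq_nil_iff.mpr (by intro a ha; simp [hall a ha])]
          rfl
        have h3 : bSlide ((0 : Int) :: t) = (0 : Int) :: t := (slide_zero_cons t).mpr hall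
        simp [hstep, h1, hfc2, h2, h3]
      · have h1 : aScan prev 1 t = false := by
          rcases Bool.eq_false_or_eq_true (aScan prev 1 t) with h | h
          · exact absurd ((scan_pos t prev 1 (by omega)).mp h) hall
          · exact h
        have h3 : bSlide ((0 : Int) :: t) ≠ (0 : Int) :: t := fun h => hall ((slide_zero_cons t).mp h)
        simp [hstep, h1, h3]
    · have hfd : (v :: t).find? (fun u => !decide (u = 0)) = some v := by
        simp [hv]
      by_cases hvp : v = prev
      · subst hvp
        have hstep : aScan v 0 (v :: t) = false := by
          simp [aScan, hv]
        simp [hstep, hfd]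
      · have hstep : aScan prev 0 (v :: t) = aScan v 0 t := by
          simp [aScan, hv, hvp]
        have hslide : (bSlide (v :: t) == v :: t) =
            ((!(t.find? (fun u => !decide (u = 0)) == some v)) && (bSlide t == t)) := by
          by_cases hh : t.find? (fun u => !decide (u = 0)) = some v
          · have hne : bSlide (v :: t) ≠ v :: t := fun h => ((slide_cons_ne v t hv).mp h).1 hh
            simp [hne, hh]
          · by_cases hs : bSlide t = t
            · have heq : bSlide (v :: t) = v :: t := (slide_cons_ne v t hv).mpr ⟨hh, hs⟩
              simp [heq, hh, hs]
            · have hne : bSlide (v :: t) ≠ v :: t := fun h => hs ((slide_cons_ne v t hv).mp h).2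
              have l1 : (bSlide (v :: t) == v :: t) = false := by simp [hne]
              have l2 : (bSlide t == t) = false := by simp [hs]
              rw [l1, l2, Bool.and_false]
        calc aScan prev 0 (v :: t) = aScan v 0 t := hstep
          _ = (!(t.find? (fun u => !decide (u = 0)) == some v) && (bSlide t == t)) := ih v hv
          _ = (bSlide (v :: t) == v :: t) := hslide.symm
          _ = (!((v :: t).find? (fun u => !decide (u = 0)) == some prev) && (bSlide (v :: t) == v :: t)) := by
              simp [hfd, hvp]

lemma all_ports_eq (L : List (List Int))
    (h : (∀ l ∈ L, StableLine l) →
      ∀ l ∈ L, l.find? (fun u => !decide (u = 0)) ≠ some (-1)) :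
    L.all (fun l => aScan (-1) 0 l) = L.all (fun l => bSlide l == l) := by
  by_cases hs : ∀ l ∈ L, StableLine l
  · have hB : L.all (fun l => bSlide l == l) = true := by
      rw [List.all_eq_true]
      intro l hl
      simpa using (stable_iff l).mpr (hs l hl)
    rw [hB, List.all_eq_true]
    intro l hl
    rw [scan_eq l (-1) (by norm_num)]
    simp [h hs l hl, (stable_iff l).mpr (hs l hl)]
  · push_neg at hs
    obtain ⟨l, hl, hns⟩ := hs
    have hsl : bSlide l ≠ l := fun h' => hns ((stable_iff l).mp h')
    have hA : L.all (fun l => aScan (-1) 0 l) = false := by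
      refine Bool.eq_false_iff.mpr fun hAll => ?_
      rw [List.all_eq_true] at hAll
      have hx := hAll l hl
      rw [scan_eq l (-1) (by norm_num)] at hx
      simp [hsl] at hx
    have hB : L.all (fun l => bSlide l == l) = false := by
      refine Bool.eq_false_iff.mpr fun hAll => ?_
      rw [List.all_eq_true] at hAll
      have hx := hAll l hl
      simp [hsl] at hx
    rw [hA, hB]

lemma portA_lines (state : List (List Int)) (action : Int)
    (hact : action = 1 ∨ action = 2 ∨ action = 3 ∨ action = 4) :
    is_invalid_action state action = (pvLinesOf state action).all (fun l => aScan (-1) 0 l) := by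
  rcases hact with h | h | h | h <;> subst h <;>
    simp [is_invalid_action, pvLinesOf, List.all_map, Function.comp_def]

lemma portB_lines (state : List (List Int)) (action : Int)
    (hact : action = 1 ∨ action = 2 ∨ action = 3 ∨ action = 4) :
    is_invalid_action_alt state action = (pvLinesOf state action).all (fun line => bSlide line == line) := by
  unfold is_invalid_action_alt
  rw [if_pos hact]

lemma list4 {α : Type} (r : List α) (h : 4 ≤ r.length) :
    ∃ a b c d rest, r = a :: b :: c :: d :: rest := by
  cases r with
  | nil => exact absurd h (by simp)
  | cons a r1 => cases r1 with
    | nil => exact absurd h (by simp)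
    | cons b r2 => cases r2 with
      | nil => exact absurd h (by simp)
      | cons c r3 => cases r3 with
        | nil => exact absurd h (by simp)
        | cons d rest => exact ⟨a, b, c, d, rest, rfl⟩

lemma dlines_eq (state : List (List Int)) (action : Int)
    (h4 : 4 ≤ state.length) (hr : ∀ row ∈ state.take 4, 4 ≤ row.length)
    (hact : action = 1 ∨ action = 2 ∨ action = 3 ∨ action = 4) :
    pvDLines state action = pvLinesOf state action := by
  obtain ⟨r0, r1, r2, r3, rest, rfl⟩ := list4 state h4
  have htake : (r0 :: r1 :: r2 :: r3 :: rest).take 4 = [r0, r1, r2, r3] := rfl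
  rw [htake] at hr
  obtain ⟨a0, a1, a2, a3, t0, hh0⟩ := list4 r0 (hr r0 (by simp))
  obtain ⟨b0, b1, b2, b3, t1, hh1⟩ := list4 r1 (hr r1 (by simp))
  obtain ⟨c0, c1, c2, c3, t2, hh2⟩ := list4 r2 (hr r2 (by simp))
  obtain ⟨d0, d1, d2, d3, t3, hh3⟩ := list4 r3 (hr r3 (by simp))
  subst hh0 hh1 hh2 hh3
  have hrange : PySem.List.pyRange 0 4 1 = [0, 1, 2, 3] := by rfl
  rcases hact with rfl | rfl | rfl | rfl <;>
    simp [pvDLines, pvDCols, pvLinesOf, pvCell, hrange, PySem.List.pyGetD_ofNat']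

-- ===== VERDICT (by name: the statement is the Claim_ definition above) =====
theorem is_invalid_action_spec : Claim_unchanged_is_invalid_action := by
  intro state action _ hpre
  unfold Spec_is_invalid_action
  intro hnD
  by_cases hact : action = 1 ∨ action = 2 ∨ action = 3 ∨ action = 4
  · have hd := dlines_eq state action (hpre hact).1 (hpre hact).2 hact
    rw [portA_lines state action hact, portB_lines state action hact]
    apply all_ports_eq
    intro hstab l hl hfind
    refine hnD ⟨by omega, by rw [hd]; exact hstab, l, by rw [hd]; exact hl, ?_⟩
    rw [headf_eq]
    exact hfind
  · push_neg at hact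
    obtain ⟨h1, h2, h3, h4⟩ := hact
    simp [is_invalid_action, is_invalid_action_alt, h1, h2, h3, h4]

theorem is_invalid_action_changed : Claim_changed_is_invalid_action := by
  unfold Claim_changed_is_invalid_action; decide

theorem is_invalid_action_tight : Claim_exact_is_invalid_action := by
  intro state action _ hpre hD
  obtain ⟨hiv, hstab, l, hl, hfind⟩ := hD
  have hact : action = 1 ∨ action = 2 ∨ action = 3 ∨ action = 4 := by omega
  have hd := dlines_eq state action (hpre hact).1 (hpre hact).2 hact
  rw [hd] at hstab hl
  rw [headf_eq] at hfind
  have hB : is_invalid_action_alt state action = true := by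
    rw [portB_lines state action hact, List.all_eq_true]
    intro l' hl'
    simpa using (stable_iff l').mpr (hstab l' hl')
  have hA : is_invalid_action state action = false := by
    rw [portA_lines state action hact]
    refine Bool.eq_false_iff.mpr fun hAll => ?_
    rw [List.all_eq_true] at hAll
    have hx := hAll l hl
    rw [scan_eq l (-1) (by norm_num)] at hx
    simp [hfind] at hx
  rw [hA, hB]
  exact Bool.false_ne_true
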